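-- pv_equiv track=rewrite | github.com/estyrke/AoC | aoc/2021/17_2.py | hit_x
-- ===== SOURCE A (Python) =====
-- def hit_x(xv0: int, minx, maxx) -> bool:
--     x = 0
--     xv = xv0
--     while True:
--         x += xv
--         if minx <= x <= maxx:
--             return True
--         if xv == 0:
--             return False
--         if xv > 0:
--             xv -= 1
-- ===== SOURCE B (Python) =====
-- def hit_x(xv0: int, minx, maxx) -> bool:
--     # Closed-form positions: after k steps x = S(k) = k*xv0 - k*(k-1)//2.
--     if xv0 < 0:
--         # x-velocity never decays: positions are the multiples k*xv0 (k >= 1).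
--         v = -xv0
--         q = (-minx) // v          # largest k with k*v <= -minx
--         return q >= 1 and q * v >= -maxx
--     lo = 0 if xv0 == 0 else 1
--     hi = xv0
--     if hi * xv0 - hi * (hi - 1) // 2 < minx:
--         return False
--     # binary search the smallest k in [lo, hi] with S(k) >= minx
--     while lo < hi:
--         mid = (lo + hi) // 2
--         if mid * xv0 - mid * (mid - 1) // 2 >= minx:
--             hi = mid
--         else:
--             lo = mid + 1
--     return lo * xv0 - lo * (lo - 1) // 2 <= maxx
-- ===== Notes on version B (the rewrite author's own statement) =====
-- stated objective: faster
-- what changed: Replaces A's step-by-step simulation of the decaying probe with the closed-form partial sum S(k)=k*xv0-k(k-1)//2: a divisibility check for negative xv0 and a binary search for the smallest k with S(k)>=minx for nonnegative xv0.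
import Mathlib
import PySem

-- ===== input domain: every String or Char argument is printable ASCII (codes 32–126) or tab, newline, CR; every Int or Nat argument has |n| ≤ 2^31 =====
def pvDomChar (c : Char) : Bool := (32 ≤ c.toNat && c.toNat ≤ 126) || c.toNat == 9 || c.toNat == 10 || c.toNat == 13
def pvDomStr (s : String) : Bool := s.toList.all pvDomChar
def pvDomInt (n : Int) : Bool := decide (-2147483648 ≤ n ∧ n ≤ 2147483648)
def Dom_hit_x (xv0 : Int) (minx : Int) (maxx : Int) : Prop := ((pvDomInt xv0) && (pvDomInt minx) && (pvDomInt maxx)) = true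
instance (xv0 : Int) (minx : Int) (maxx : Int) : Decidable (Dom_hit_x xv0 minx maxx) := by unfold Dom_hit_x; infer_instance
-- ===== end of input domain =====

-- B replaces A's step-by-step simulation by the closed-form position S(k)=k*xv0-k(k-1)//2
-- (divisibility check for xv0<0, binary search for xv0≥0); objective: faster.

-- ===== PORT A =====
-- A's `while True` loop; the fuel argument only makes it total — Pre_hit_x guarantees
-- the loop returns within the supplied fuel, so `none` is never hit on admitted inputs.
def hitLoop (minx maxx : Int) : Nat → Int → Int → Option Bool
  | 0, _, _ => none
  | fuel+1, x, xv =>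
    let x' := x + xv
    if minx ≤ x' ∧ x' ≤ maxx then some true
    else if xv = 0 then some false
    else hitLoop minx maxx fuel x' (if 0 < xv then xv - 1 else xv)

def hit_x (xv0 : Int) (minx : Int) (maxx : Int) : Bool :=
  (hitLoop minx maxx (xv0.natAbs + minx.natAbs + 2) 0 xv0).getD false

-- ===== PORT B =====
-- S(k): probe x-position after k steps
def S_alt (xv0 k : Int) : Int := k * xv0 - PySem.Int.floordiv (k * (k - 1)) 2

def bsearch (xv0 minx lo hi : Int) : Int :=
  if h : lo < hi then
    let mid := PySem.Int.floordiv (lo + hi) 2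
    if minx ≤ S_alt xv0 mid then bsearch xv0 minx lo mid
    else bsearch xv0 minx (mid + 1) hi
  else lo
termination_by (hi - lo).toNat
decreasing_by
  · have h1 := (PySem.Int.floordiv_lt_iff_lt_mul (a := lo + hi) (b := 2) (q := hi) (by norm_num)).mpr (by omega)
    omega
  · have h2 := PySem.Int.floordiv_two_mid_bounds (le_of_lt h)
    omega

def hit_x_alt (xv0 : Int) (minx : Int) (maxx : Int) : Bool :=
  if xv0 < 0 then
    let v := -xv0
    let q := PySem.Int.floordiv (-minx) v
    decide (1 ≤ q) && decide (-maxx ≤ q * v)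
  else
    let lo : Int := if xv0 = 0 then 0 else 1
    let hi := xv0
    if S_alt xv0 hi < minx then false
    else decide (S_alt xv0 (bsearch xv0 minx lo hi) ≤ maxx)

-- ===== PRECONDITION & SPEC =====
-- Pre_ excludes exactly the inputs with xv0 < 0 whose non-decaying trajectory (the multiples
-- k*xv0, k ≥ 1) never enters [minx, maxx]: there A's `while True` loop runs forever.
def Pre_hit_x (xv0 : Int) (minx : Int) (maxx : Int) : Prop :=
  xv0 < 0 →
    (1 ≤ PySem.Int.floordiv (-minx) (-xv0) ∧
     -maxx ≤ PySem.Int.floordiv (-minx) (-xv0) * (-xv0))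
instance (xv0 : Int) (minx : Int) (maxx : Int) : Decidable (Pre_hit_x xv0 minx maxx) := by
  unfold Pre_hit_x; infer_instance

def pvWitness_hit_x : Int × Int × Int := (5, 3, 7)

def Spec_hit_x (xv0 : Int) (minx : Int) (maxx : Int) (out : Bool) : Prop := out = hit_x_alt xv0 minx maxx
instance (xv0 : Int) (minx : Int) (maxx : Int) (out : Bool) : Decidable (Spec_hit_x xv0 minx maxx out) := by unfold Spec_hit_x; infer_instance

-- ===== CLAIM (what is proved, stated in full; the proofs are below) =====
def Claim_equal_hit_x : Prop := ∀ (xv0 : Int) (minx : Int) (maxx : Int), Dom_hit_x xv0 minx maxx → Pre_hit_x xv0 minx maxx → Spec_hit_x xv0 minx maxx (hit_x xv0 minx maxx)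

-- ===== LEMMAS AND PROOFS =====

theorem S_alt_succ (xv0 k : Int) : S_alt xv0 (k + 1) = S_alt xv0 k + (xv0 - k) := by
  unfold S_alt
  obtain ⟨t, ht⟩ := Int.even_mul_succ_self (k - 1)
  have h1 : k * (k - 1) = 2 * t := by linear_combination ht
  have h2 : (k + 1) * (k + 1 - 1) = 2 * (t + k) := by linear_combination h1
  rw [h1, h2, PySem.Int.floordiv_eq_ediv_of_pos (by norm_num),
      PySem.Int.floordiv_eq_ediv_of_pos (by norm_num),
      Int.mul_ediv_cancel_left _ (by norm_num : (2:Int) ≠ 0),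
      Int.mul_ediv_cancel_left _ (by norm_num : (2:Int) ≠ 0)]
  ring

theorem S_alt_zero (xv0 : Int) : S_alt xv0 0 = 0 := by
  unfold S_alt
  norm_num [show PySem.Int.floordiv 0 2 = 0 from by decide]

theorem S_alt_one (xv0 : Int) : S_alt xv0 1 = xv0 := by
  have := S_alt_succ xv0 0
  rw [S_alt_zero] at this
  simpa using this

theorem S_alt_shift (xv0 k : Int) : S_alt xv0 (k + 1) = xv0 + S_alt (xv0 - 1) k := by
  unfold S_alt
  obtain ⟨t, ht⟩ := Int.even_mul_succ_self (k - 1)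
  have h1 : k * (k - 1) = 2 * t := by linear_combination ht
  have h2 : (k + 1) * (k + 1 - 1) = 2 * (t + k) := by linear_combination h1
  rw [h1, h2, PySem.Int.floordiv_eq_ediv_of_pos (by norm_num),
      PySem.Int.floordiv_eq_ediv_of_pos (by norm_num),
      Int.mul_ediv_cancel_left _ (by norm_num : (2:Int) ≠ 0),
      Int.mul_ediv_cancel_left _ (by norm_num : (2:Int) ≠ 0)]
  ring

theorem S_alt_mono (xv0 : Int) (d : Nat) : ∀ a : Int, 0 ≤ a → a + d ≤ xv0 →
    S_alt xv0 a ≤ S_alt xv0 (a + d) := by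
  induction d with
  | zero => intro a _ _; simp
  | succ m ih =>
    intro a h0 hd
    have h1 : a + (m : Int) ≤ xv0 - 1 := by push_cast at hd ⊢; omega
    have h2 : S_alt xv0 (a + m + 1) = S_alt xv0 (a + m) + (xv0 - (a + m)) := S_alt_succ _ _
    have h3 := ih a h0 (by omega)
    have : a + ((m + 1 : Nat) : Int) = a + m + 1 := by push_cast; ring
    rw [this, h2]
    omega

theorem S_alt_mono' (xv0 a b : Int) (h0 : 0 ≤ a) (hab : a ≤ b) (hb : b ≤ xv0) :
    S_alt xv0 a ≤ S_alt xv0 b := by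
  have := S_alt_mono xv0 (b - a).toNat a h0 (by omega)
  rwa [show a + ((b - a).toNat : Int) = b by omega] at this

theorem bsearch_spec (xv0 minx : Int) (lo hi : Int) (hle : lo ≤ hi) (hhi : minx ≤ S_alt xv0 hi)
    (hm : ∀ a b : Int, lo ≤ a → a ≤ b → b ≤ hi → S_alt xv0 a ≤ S_alt xv0 b) :
    lo ≤ bsearch xv0 minx lo hi ∧ bsearch xv0 minx lo hi ≤ hi ∧
    minx ≤ S_alt xv0 (bsearch xv0 minx lo hi) ∧
    ∀ k, lo ≤ k → k < bsearch xv0 minx lo hi → S_alt xv0 k < minx := by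
  fun_induction bsearch xv0 minx lo hi with
  | case1 lo hi h mid hmid ih =>
    have hb := PySem.Int.floordiv_two_mid_bounds (le_of_lt h)
    obtain ⟨r1, r2, r3, r4⟩ := ih hb.1 hmid (fun a b ha hab hbb => hm a b ha hab (le_trans hbb hb.2))
    exact ⟨r1, le_trans r2 hb.2, r3, r4⟩
  | case2 lo hi h mid hmid ih =>
    have hb := PySem.Int.floordiv_two_mid_bounds (le_of_lt h)
    have hmidlt : mid < hi :=
      (PySem.Int.floordiv_lt_iff_lt_mul (a := lo + hi) (b := 2) (q := hi) (by norm_num)).mpr (by omega)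
    obtain ⟨r1, r2, r3, r4⟩ := ih (by omega) hhi (fun a b ha hab hbb => hm a b (by omega) hab hbb)
    refine ⟨by omega, r2, r3, fun k hk1 hk2 => ?_⟩
    by_cases hkm : k ≤ mid
    · have := hm k mid hk1 hkm (by omega)
      omega
    · exact r4 k (by omega) hk2
  | case3 lo hi h =>
    have : lo = hi := by omega
    exact ⟨le_refl _, by omega, this ▸ hhi, fun k hk1 hk2 => by omega⟩

theorem loop_pos (minx maxx : Int) (n : Nat) : ∀ (x : Int) (fuel : Nat), n + 1 ≤ fuel →
    hitLoop minx maxx fuel x (n : Int) =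
      some (decide (∃ i : Nat, i ≤ n ∧ minx ≤ x + S_alt (n : Int) (i + 1) ∧
                    x + S_alt (n : Int) (i + 1) ≤ maxx)) := by
  induction n with
  | zero =>
    intro x fuel hf
    obtain ⟨f, rfl⟩ : ∃ f, fuel = f + 1 := ⟨fuel - 1, by omega⟩
    simp only [hitLoop, Nat.cast_zero, add_zero]
    by_cases h : minx ≤ x ∧ x ≤ maxx
    · rw [if_pos h]
      refine congrArg some (decide_eq_true ⟨0, le_refl 0, ?_, ?_⟩).symm <;>
        simp [S_alt_one, h.1, h.2]
    · rw [if_neg h]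
      simp only [if_true]
      refine congrArg some (decide_eq_false ?_).symm
      rintro ⟨i, hi, h1, h2⟩
      interval_cases i
      simp [S_alt_one] at h1 h2
      exact h ⟨h1, h2⟩
  | succ m ih =>
    intro x fuel hf
    obtain ⟨f, rfl⟩ : ∃ f, fuel = f + 1 := ⟨fuel - 1, by omega⟩
    simp only [hitLoop]
    by_cases h : minx ≤ x + ((m + 1 : Nat) : Int) ∧ x + ((m + 1 : Nat) : Int) ≤ maxx
    · rw [if_pos h]
      obtain ⟨ha, hb⟩ := h
      refine congrArg some (decide_eq_true ⟨0, by omega, ?_, ?_⟩).symm <;>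
        · simp only [Nat.cast_zero, zero_add, S_alt_one]
          push_cast at ha hb ⊢
          omega
    · rw [if_neg h, if_neg (by push_cast; omega : ¬ ((m + 1 : Nat) : Int) = 0),
          if_pos (by push_cast; omega : (0:Int) < ((m + 1 : Nat) : Int))]
      rw [show ((m + 1 : Nat) : Int) - 1 = (m : Int) by push_cast; ring]
      rw [ih (x + ((m + 1 : Nat) : Int)) f (by omega)]
      refine congrArg some ?_
      rw [decide_eq_decide]
      constructor
      · rintro ⟨i, hi, h1, h2⟩
        refine ⟨i + 1, by omega, ?_, ?_⟩ <;>
        · have hs : S_alt ((m + 1 : Nat) : Int) ((i:Int) + 1 + 1) =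
              ((m + 1 : Nat) : Int) + S_alt ((m:Int)) ((i:Int) + 1) := by
            rw [S_alt_shift]
            congr 2
            push_cast; ring
          push_cast at hs ⊢
          push_cast at h1 h2
          omega
      · rintro ⟨i, hi, h1, h2⟩
        match i, hi with
        | 0, _ =>
          exfalso
          simp only [Nat.cast_zero, zero_add, S_alt_one] at h1 h2
          exact h ⟨h1, h2⟩
        | j + 1, hj =>
          refine ⟨j, by omega, ?_, ?_⟩ <;>
          · have hs : S_alt ((m + 1 : Nat) : Int) ((j:Int) + 1 + 1) =
                ((m + 1 : Nat) : Int) + S_alt ((m:Int)) ((j:Int) + 1) := by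
              rw [S_alt_shift]
              congr 2
              push_cast; ring
            push_cast at hs ⊢
            push_cast at h1 h2
            omega

theorem loop_neg (minx maxx : Int) (k : Nat) : ∀ (fuel : Nat) (x v : Int), k < fuel → v < 0 →
    minx ≤ x + ((k : Int) + 1) * v → x + ((k : Int) + 1) * v ≤ maxx →
    hitLoop minx maxx fuel x v = some true := by
  induction k with
  | zero =>
    intro fuel x v hk hv h1 h2
    obtain ⟨f, rfl⟩ : ∃ f, fuel = f + 1 := ⟨fuel - 1, by omega⟩
    simp only [hitLoop]
    norm_num at h1 h2
    rw [if_pos ⟨h1, h2⟩]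
  | succ m ih =>
    intro fuel x v hk hv h1 h2
    obtain ⟨f, rfl⟩ : ∃ f, fuel = f + 1 := ⟨fuel - 1, by omega⟩
    simp only [hitLoop]
    by_cases h : minx ≤ x + v ∧ x + v ≤ maxx
    · rw [if_pos h]
    · rw [if_neg h, if_neg (by omega : ¬ v = 0), if_neg (by omega : ¬ (0:Int) < v)]
      refine ih f (x + v) v (by omega) hv ?_ ?_ <;>
      · have e : (((m + 1 : Nat) : Int) + 1) * v = v + ((m : Int) + 1) * v := by push_cast; ring
        linarith [h1, h2, e]

theorem alt_pos (xv0 minx maxx : Int) (h0 : 0 ≤ xv0) :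
    hit_x_alt xv0 minx maxx =
      decide (∃ i : Nat, i ≤ xv0.toNat ∧ minx ≤ S_alt xv0 ((i:Int) + 1) ∧
              S_alt xv0 ((i:Int) + 1) ≤ maxx) := by
  unfold hit_x_alt
  rw [if_neg (by omega)]
  set lo : Int := if xv0 = 0 then 0 else 1 with hlo
  have hlo0 : 0 ≤ lo ∧ lo ≤ 1 ∧ lo ≤ xv0 := by
    rw [hlo]; split_ifs with hz <;> omega
  have hStop : S_alt xv0 ((xv0.toNat : Int) + 1) = S_alt xv0 xv0 := by
    rw [show ((xv0.toNat : Int)) = xv0 by omega, S_alt_succ]; ring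
  by_cases hS : S_alt xv0 xv0 < minx
  · rw [if_pos hS]
    refine (decide_eq_false ?_).symm
    rintro ⟨i, hi, h1, h2⟩
    have key : S_alt xv0 ((i:Int) + 1) ≤ S_alt xv0 xv0 := by
      rcases lt_or_eq_of_le hi with hlt | heq
      · exact S_alt_mono' xv0 _ _ (by omega) (by omega) (le_refl _)
      · rw [heq] at *
        rw [← hStop]
    omega
  · rw [if_neg hS]
    rw [not_lt] at hS
    obtain ⟨hr1, hr2, hr3, hr4⟩ :=
      bsearch_spec xv0 minx lo xv0 hlo0.2.2 hS
        (fun a b ha hab hbb => S_alt_mono' xv0 a b (by omega) hab hbb)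
    set r := bsearch xv0 minx lo xv0 with hr
    rw [decide_eq_decide]
    constructor
    · intro hmax
      by_cases hr0 : r = 0
      · have hx0 : xv0 = 0 := by
          by_contra hne
          rw [hlo] at hr1; simp [hne] at hr1; omega
        rw [hr0, S_alt_zero] at hr3 hmax
        refine ⟨0, by omega, ?_, ?_⟩ <;>
          · simp only [Nat.cast_zero, zero_add, S_alt_one, hx0]
            omega
      · refine ⟨(r - 1).toNat, by omega, ?_, ?_⟩ <;>
          rw [show ((r - 1).toNat : Int) + 1 = r by omega] <;> omega
    · rintro ⟨i, hi, h1, h2⟩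
      by_cases hin : (i : Int) + 1 ≤ xv0
      · have hrk : r ≤ (i:Int) + 1 := by
          by_contra hgt
          have := hr4 ((i:Int) + 1) (by omega) (by omega)
          omega
        have := S_alt_mono' xv0 r ((i:Int) + 1) (by omega) hrk hin
        omega
      · have hieq : (i : Int) = xv0.toNat := by omega
        have hS1 : S_alt xv0 ((i:Int) + 1) = S_alt xv0 xv0 := by rw [hieq, hStop]
        have := S_alt_mono' xv0 r xv0 (by omega) hr2 (le_refl _)
        omega

theorem hit_x_spec : Claim_equal_hit_x := by
  intro xv0 minx maxx _ hpre
  unfold Spec_hit_x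
  by_cases hneg : xv0 < 0
  · obtain ⟨hq1, hq2⟩ := hpre hneg
    set v : Int := -xv0 with hvdef
    set q : Int := PySem.Int.floordiv (-minx) v with hqdef
    have hv : 0 < v := by omega
    have hqv : q * v ≤ -minx := (PySem.Int.le_floordiv_iff_mul_le hv).mp (le_refl q)
    have hqle : q ≤ -minx := by nlinarith
    have hB : hit_x_alt xv0 minx maxx = true := by
      unfold hit_x_alt
      rw [if_pos hneg]
      simp only [← hvdef, ← hqdef, Bool.and_eq_true, decide_eq_true_iff]
      exact ⟨hq1, hq2⟩
    rw [hB]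
    unfold hit_x
    obtain ⟨k, hkq⟩ : ∃ k : Nat, ((k : Int) + 1) = q := ⟨(q - 1).toNat, by omega⟩
    rw [loop_neg minx maxx k _ 0 xv0 (by omega) hneg
        (by rw [hkq]; nlinarith) (by rw [hkq]; nlinarith)]
    rfl
  · rw [not_lt] at hneg
    set n := xv0.toNat with hn
    have hxv : ((n : Nat) : Int) = xv0 := by omega
    unfold hit_x
    rw [← hxv]
    rw [loop_pos minx maxx n 0 _ (by simp; omega)]
    rw [alt_pos ((n : Nat) : Int) minx maxx (by exact_mod_cast Int.natCast_nonneg n)]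
    simp only [Option.getD_some, Int.toNat_natCast]
    rw [decide_eq_decide]
    constructor <;> (rintro ⟨i, hi, h1, h2⟩; exact ⟨i, hi, by simpa using h1, by simpa using h2⟩)
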